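-- pv_equiv track=rewrite | github.com/HongminAn03/EM-Pulse-Algorithm | Gen_EMPS.py | non_recursive_seq
-- ===== SOURCE A (Python) =====
-- def non_recursive_seq(pulse_count):
--     sequence = [1]
--     next_sequence = []
--     while len(sequence) < pulse_count:
--         next_sequence.clear()
--         for num in sequence:
--             odd = 2 * num - 1
--             if odd <= pulse_count:
--                 next_sequence.append(odd)
--         for num in sequence:
--             even = 2 * num
--             if even <= pulse_count:
--                 next_sequence.append(even)
--         sequence = next_sequence[:]
--
--     return sequence
-- ===== SOURCE B (Python) =====
-- def _rev(i, b):
--     # reverse the low b bits of i (recursion on the top bit)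
--     if b == 0:
--         return 0
--     half = 1 << (b - 1)
--     if i < half:
--         return 2 * _rev(i, b - 1)
--     return 2 * _rev(i - half, b - 1) + 1
--
--
-- def non_recursive_seq(pulse_count):
--     b = 0
--     while (1 << b) < pulse_count:
--         b += 1
--     return [v for v in ((_rev(i, b) + 1) for i in range(1 << b)) if v <= pulse_count]
-- ===== Notes on version B (the rewrite author's own statement) =====
-- stated objective: alternative
-- what changed: Replaces A's repeated doubling-and-filtering passes (rebuilding the whole list each round until it reaches pulse_count elements) by a direct closed form: the sequence is the bit-reversal permutation of range(2^b) for the smallest 2^b >= pulse_count, shifted by 1 and filtered to <= pulse_count.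
-- intended difference: For pulse_count < 1, A returns [1] (its untouched initial list, even though 1 exceeds pulse_count) while B returns [], the intended empty pulse sequence for a nonpositive pulse count. — e.g. on non_recursive_seq(0): A returns [1], B returns []
import Mathlib
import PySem

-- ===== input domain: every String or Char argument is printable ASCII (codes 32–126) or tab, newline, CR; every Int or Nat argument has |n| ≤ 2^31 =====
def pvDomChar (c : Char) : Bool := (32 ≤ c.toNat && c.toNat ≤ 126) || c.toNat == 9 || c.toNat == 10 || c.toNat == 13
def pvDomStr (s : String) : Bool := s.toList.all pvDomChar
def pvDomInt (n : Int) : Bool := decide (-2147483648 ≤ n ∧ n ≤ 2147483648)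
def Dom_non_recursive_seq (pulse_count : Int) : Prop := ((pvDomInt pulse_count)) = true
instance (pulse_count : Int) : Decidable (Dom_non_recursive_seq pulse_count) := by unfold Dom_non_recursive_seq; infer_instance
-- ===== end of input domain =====

-- B replaces A's repeated doubling-and-filtering passes by a direct bit-reversal
-- closed form over range(2^b) (objective: alternative); on pulse_count < 1 B returns []
-- where A returns its leftover initial [1].

-- ===== PORT A =====
-- one iteration of A's while body: two append loops over `sequence`
def nsBody (pulse_count : Int) (sequence : List Int) : List Int :=
  sequence.foldl
    (fun acc num => if 2 * num ≤ pulse_count then acc ++ [2 * num] else acc)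
    (sequence.foldl
      (fun acc num => if 2 * num - 1 ≤ pulse_count then acc ++ [2 * num - 1] else acc) [])

-- A's `while len(sequence) < pulse_count` loop; fuel only makes it total
-- (64 iterations always suffice on Dom, where |pulse_count| ≤ 2^31)
def nsWhile (pulse_count : Int) : Nat → List Int → List Int
  | 0, sequence => sequence
  | fuel + 1, sequence =>
    if PySem.List.len sequence < pulse_count then
      nsWhile pulse_count fuel (nsBody pulse_count sequence)
    else sequence

def non_recursive_seq (pulse_count : Int) : List Int :=
  nsWhile pulse_count 64 [1]

-- ===== PORT B =====
-- _rev(i, b): reverse the low b bits of i, recursing on the top bit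
def revBits : Nat → Nat → Nat
  | 0, _ => 0
  | b + 1, i => if i < 1 <<< b then 2 * revBits b i else 2 * revBits b (i - 1 <<< b) + 1

-- B's `while (1 << b) < pulse_count: b += 1`; fuel only makes it total
def findBits (pulse_count : Int) : Nat → Nat → Nat
  | 0, b => b
  | fuel + 1, b =>
    if ((1 <<< b : Nat) : Int) < pulse_count then findBits pulse_count fuel (b + 1) else b

def non_recursive_seq_alt (pulse_count : Int) : List Int :=
  ((List.range (1 <<< findBits pulse_count 64 0)).map
      (fun i => ((revBits (findBits pulse_count 64 0) i : Int) + 1))).filter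
    (fun v => v ≤ pulse_count)

-- ===== PRECONDITION & SPEC =====
-- On pulse_count < 1 A returns [1], its untouched initial list (the loop never runs),
-- even though 1 exceeds pulse_count; B returns the intended empty pulse sequence.
def D_non_recursive_seq (pulse_count : Int) : Prop := pulse_count < 1
instance (pulse_count : Int) : Decidable (D_non_recursive_seq pulse_count) := by
  unfold D_non_recursive_seq; infer_instance

def Spec_non_recursive_seq (pulse_count : Int) (out : List Int) : Prop :=
  ¬ D_non_recursive_seq pulse_count → out = non_recursive_seq_alt pulse_count
instance (pulse_count : Int) (out : List Int) : Decidable (Spec_non_recursive_seq pulse_count out) := by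
  unfold Spec_non_recursive_seq; infer_instance

def pvDiffWitness_non_recursive_seq : Int := 0
def pvDiffWitnessOut_non_recursive_seq : (List Int) × (List Int) := ([1], [])

-- ===== CLAIM (what is proved, stated in full; the proofs are below) =====
def Claim_unchanged_non_recursive_seq : Prop := ∀ (pulse_count : Int), Dom_non_recursive_seq pulse_count → Spec_non_recursive_seq pulse_count (non_recursive_seq pulse_count)
def Claim_changed_non_recursive_seq : Prop := Dom_non_recursive_seq (pvDiffWitness_non_recursive_seq) ∧ D_non_recursive_seq (pvDiffWitness_non_recursive_seq) ∧ non_recursive_seq (pvDiffWitness_non_recursive_seq) = pvDiffWitnessOut_non_recursive_seq.1 ∧ non_recursive_seq_alt (pvDiffWitness_non_recursive_seq) = pvDiffWitnessOut_non_recursive_seq.2 ∧ pvDiffWitnessOut_non_recursive_seq.1 ≠ pvDiffWitnessOut_non_recursive_seq.2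
def Claim_exact_non_recursive_seq : Prop := ∀ (pulse_count : Int), Dom_non_recursive_seq pulse_count → D_non_recursive_seq pulse_count → non_recursive_seq pulse_count ≠ non_recursive_seq_alt pulse_count

-- ===== LEMMAS AND PROOFS =====

-- the bit-reversed list of a given bit width, filtered by pulse_count
def F (pc : Int) (b : Nat) : List Int :=
  ((List.range (2 ^ b)).map (fun i => ((revBits b i : Int) + 1))).filter (fun v => v ≤ pc)

lemma revBits_lt (b : Nat) : ∀ i, revBits b i < 2 ^ b := by
  induction b with
  | zero => intro i; simp [revBits]
  | succ b ih =>
    intro i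
    simp only [revBits, Nat.shiftLeft_eq, one_mul, pow_succ]
    split_ifs with h
    · have := ih i; omega
    · have := ih (i - 2 ^ b); omega

lemma revBits_inj (b : Nat) : ∀ i j, i < 2 ^ b → j < 2 ^ b →
    revBits b i = revBits b j → i = j := by
  induction b with
  | zero => intro i j hi hj _; omega
  | succ b ih =>
    intro i j hi hj h
    simp only [revBits, Nat.shiftLeft_eq, one_mul] at h
    rw [pow_succ] at hi hj
    split_ifs at h with h1 h2 h2
    · exact ih i j h1 h2 (by omega)
    · omega
    · omega
    · have := ih (i - 2 ^ b) (j - 2 ^ b) (by omega) (by omega) (by omega); omega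

lemma revBits_surj (b : Nat) (j : Nat) (hj : j < 2 ^ b) :
    ∃ i, i < 2 ^ b ∧ revBits b i = j := by
  classical
  have hsub : (Finset.range (2 ^ b)).image (revBits b) ⊆ Finset.range (2 ^ b) := by
    intro x hx
    simp only [Finset.mem_image, Finset.mem_range] at hx ⊢
    obtain ⟨i, _, rfl⟩ := hx
    exact revBits_lt b i
  have hcard : (Finset.range (2 ^ b)).card ≤ ((Finset.range (2 ^ b)).image (revBits b)).card := by
    rw [Finset.card_image_of_injOn]
    intro i hi j hj hij
    exact revBits_inj b i j (Finset.mem_range.mp hi) (Finset.mem_range.mp hj) hij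
  have heq := Finset.eq_of_subset_of_card_le hsub hcard
  have : j ∈ (Finset.range (2 ^ b)).image (revBits b) := by
    rw [heq]; exact Finset.mem_range.mpr hj
  simp only [Finset.mem_image, Finset.mem_range] at this
  obtain ⟨i, hi, hrev⟩ := this
  exact ⟨i, hi, hrev⟩

-- the unfiltered bit-reversal list doubles exactly as A's body does
lemma S_succ (b : Nat) :
    (List.range (2 ^ (b + 1))).map (fun i => ((revBits (b + 1) i : Int) + 1))
      = (((List.range (2 ^ b)).map (fun i => ((revBits b i : Int) + 1))).map (fun n => 2 * n - 1))
        ++ (((List.range (2 ^ b)).map (fun i => ((revBits b i : Int) + 1))).map (fun n => 2 * n)) := by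
  have h2 : 2 ^ (b + 1) = 2 ^ b + 2 ^ b := by ring
  rw [h2, List.range_add, List.map_append, List.map_map, List.map_map, List.map_map]
  congr 1
  · apply List.map_congr_left
    intro i hi
    have hi' := List.mem_range.mp hi
    simp only [Function.comp_apply, revBits, Nat.shiftLeft_eq, one_mul, if_pos hi']
    push_cast; ring
  · apply List.map_congr_left
    intro i hi
    have hi' := List.mem_range.mp hi
    simp only [Function.comp, revBits, Nat.shiftLeft_eq, one_mul]
    rw [if_neg (by omega)]
    have : 2 ^ b + i - 2 ^ b = i := by omega
    rw [this]
    push_cast; ring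

lemma body_F (pc : Int) (b : Nat) (hpc : 1 ≤ pc) :
    nsBody pc (F pc b) = F pc (b + 1) := by
  unfold nsBody F
  rw [PySem.List.foldl_append_ite, PySem.List.foldl_append_ite, List.nil_append, S_succ]
  simp only [List.filter_append, List.filter_map, List.filter_filter, List.map_map,
    Function.comp]
  congr 1 <;>
  · congr 1
    apply List.filter_congr
    intro i _
    have hr := Int.natCast_nonneg (revBits b i)
    by_cases h1 : 2 * ((revBits b i : Int) + 1) - 1 ≤ pc <;>
      by_cases h2 : 2 * ((revBits b i : Int) + 1) ≤ pc <;>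
      by_cases h3 : ((revBits b i : Int)) + 1 ≤ pc <;>
      simp [h1, h2, h3] <;> omega

lemma perm_rev (b : Nat) : ((List.range (2 ^ b)).map (revBits b)).Perm (List.range (2 ^ b)) := by
  apply List.perm_of_nodup_nodup_toFinset_eq
  · exact (List.nodup_map_iff_inj_on (List.nodup_range)).mpr
      (fun x hx y hy h => revBits_inj b x y (List.mem_range.mp hx) (List.mem_range.mp hy) h)
  · exact List.nodup_range
  · ext x
    simp only [List.mem_toFinset, List.mem_map, List.mem_range]
    constructor
    · rintro ⟨i, _, rfl⟩; exact revBits_lt b i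
    · intro hx; exact revBits_surj b x hx

lemma countP_range_lt (m N : Nat) :
    (List.range N).countP (fun j => decide (j < m)) = min m N := by
  induction N with
  | zero => simp
  | succ N ih =>
    rw [List.range_succ, List.countP_append, ih]
    by_cases h : N < m <;> simp [h] <;> omega

lemma len_F (pc : Int) (b : Nat) (hpc : 1 ≤ pc) :
    (F pc b).length = min pc.toNat (2 ^ b) := by
  unfold F
  rw [← List.countP_eq_length_filter, List.countP_map]
  have h1 : ((List.range (2 ^ b)).countP ((fun v => decide (v ≤ pc)) ∘ fun i => ((revBits b i : Int) + 1)))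
      = ((List.range (2 ^ b)).map (revBits b)).countP (fun j => decide (j < pc.toNat)) := by
    rw [List.countP_map]
    apply List.countP_congr
    intro i _
    simp only [Function.comp_apply, decide_eq_true_eq]
    omega
  rw [h1, (perm_rev b).countP_eq, countP_range_lt]

lemma loop_F (pc : Int) (hpc : 1 ≤ pc) :
    ∀ (fuel b : Nat), nsWhile pc fuel (F pc b) = F pc (findBits pc fuel b) := by
  intro fuel
  induction fuel with
  | zero => intro b; simp [nsWhile, findBits]
  | succ fuel ih =>
    intro b
    have hlen := len_F pc b hpc
    have hcond : (PySem.List.len (F pc b) < pc) ↔ (((1 <<< b : Nat) : Int) < pc) := by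
      rw [PySem.List.len_eq, hlen, Nat.shiftLeft_eq, one_mul]
      omega
    by_cases h : ((1 <<< b : Nat) : Int) < pc
    · rw [nsWhile, findBits, if_pos (hcond.mpr h), if_pos h, body_F pc b hpc, ih]
    · rw [nsWhile, findBits, if_neg (fun hc => h (hcond.mp hc)), if_neg h]

lemma F_zero (pc : Int) (hpc : 1 ≤ pc) : F pc 0 = [1] := by
  unfold F
  simp [revBits, List.filter, hpc]

-- ===== VERDICT (by name: the statement is the Claim_ definition above) =====
theorem non_recursive_seq_spec : Claim_unchanged_non_recursive_seq := by
  intro pc _ hnd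
  unfold D_non_recursive_seq at hnd
  have hpc : 1 ≤ pc := by omega
  unfold non_recursive_seq non_recursive_seq_alt
  rw [← F_zero pc hpc, loop_F pc hpc 64 0]
  unfold F
  rw [Nat.shiftLeft_eq, one_mul]


theorem non_recursive_seq_changed : Claim_changed_non_recursive_seq := by
  unfold Claim_changed_non_recursive_seq; decide

theorem non_recursive_seq_tight : Claim_exact_non_recursive_seq := by
  intro pc _ hd
  unfold D_non_recursive_seq at hd
  have hA : non_recursive_seq pc = [1] := by
    unfold non_recursive_seq nsWhile
    rw [if_neg (by simp [PySem.List.len_eq]; omega)]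
  have hB : non_recursive_seq_alt pc = [] := by
    have hf : findBits pc 64 0 = 0 := by
      rw [findBits]
      rw [if_neg (by simp; omega)]
    unfold non_recursive_seq_alt
    rw [hf]
    simp [revBits, show ¬ (1:Int) ≤ pc from by omega]
  rw [hA, hB]; simp
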